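-- pv_equiv track=rewrite | github.com/CryogenicPlanet/advent-of-code | 2019/day4/day4P2.py | returnDoubles
-- ===== SOURCE A (Python) =====
-- def returnDoubles(number):
--     strInp = str(number)
--     hasDouble = {}
--     for i in range(0, len(strInp) - 1):
--         firstDigit = int(strInp[i])
--         secondDigit = int(strInp[i + 1])
--         if (firstDigit == secondDigit):
--             hasDouble[firstDigit] = True
--     return hasDouble
-- ===== SOURCE B (Python) =====
-- def returnDoubles(number):
--     strInp = str(number)
--     hasDouble = {}
--     cur = strInp[0]
--     count = 1
--     for ch in strInp[1:]:
--         if ch == cur: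
--             count += 1
--         else:
--             if count >= 2:
--                 hasDouble[int(cur)] = True
--             cur = ch
--             count = 1
--     if count >= 2:
--         hasDouble[int(cur)] = True
--     return hasDouble
-- ===== Notes on version B (the rewrite author's own statement) =====
-- stated objective: alternative
-- what changed: B replaces A's index-based scan comparing int(s[i]) == int(s[i+1]) at every position with a single run-length scan carrying (current char, run counter) that inserts each digit once per run of length >= 2.
import Mathlib
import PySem

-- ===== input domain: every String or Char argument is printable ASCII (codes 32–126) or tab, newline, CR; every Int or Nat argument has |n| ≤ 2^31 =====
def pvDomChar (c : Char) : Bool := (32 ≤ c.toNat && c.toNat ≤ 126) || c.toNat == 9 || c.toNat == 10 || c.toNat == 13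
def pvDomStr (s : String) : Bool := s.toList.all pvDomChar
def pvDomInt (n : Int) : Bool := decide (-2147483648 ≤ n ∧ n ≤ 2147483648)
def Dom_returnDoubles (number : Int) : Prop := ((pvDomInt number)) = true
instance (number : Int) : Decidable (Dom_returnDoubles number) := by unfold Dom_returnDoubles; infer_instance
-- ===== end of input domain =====

-- B replaces A's index-based adjacent-pair scan with a single run-length scan (current char + run
-- counter) that converts each digit with int() only once per run of length ≥ 2; return values agree
-- on every number A accepts (the nonnegative ones).

-- int(<one-character string>) as both Pythons use it (only ever applied to digit characters inside Pre_)
def pyDigit (c : Char) : Int := (PySem.Int.ofChars? [c]).getD 0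

-- ===== PORT A =====
def returnDoubles (number : Int) : List (Int × Bool) :=
  let strInp := PySem.Int.toChars number
  ((PySem.List.pyRange 0 (PySem.List.len strInp - 1) 1).foldl
    (fun hasDouble i =>
      let firstDigit := ((PySem.List.pyGet? strInp i).map pyDigit).getD 0
      let secondDigit := ((PySem.List.pyGet? strInp (i + 1)).map pyDigit).getD 0
      if firstDigit = secondDigit then hasDouble.insert firstDigit true else hasDouble)
    PySem.Dict.empty).items

-- ===== PORT B =====
-- the for-loop of Source B over the remaining characters, carrying (hasDouble, cur, count);
-- the [] case is the final 'if count >= 2' after the loop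
def rdGo (hasDouble : PySem.Dict Int Bool) (cur : Char) (count : Int) : List Char → PySem.Dict Int Bool
  | [] => if 2 ≤ count then hasDouble.insert (pyDigit cur) true else hasDouble
  | ch :: rest =>
      if ch = cur then rdGo hasDouble cur (count + 1) rest
      else rdGo (if 2 ≤ count then hasDouble.insert (pyDigit cur) true else hasDouble) ch 1 rest

def returnDoubles_alt (number : Int) : List (Int × Bool) :=
  match PySem.Int.toChars number with
  | [] => []  -- unreachable (str(number) is never empty): totality guard for strInp[0]
  | c :: rest => (rdGo PySem.Dict.empty c 1 rest).items

-- ===== PRECONDITION & SPEC =====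
-- A raises ValueError on every negative number (int('-') on the sign character), so Pre_ keeps the
-- nonnegative ones; A returns on all of those.
def Pre_returnDoubles (number : Int) : Prop := 0 ≤ number
instance (number : Int) : Decidable (Pre_returnDoubles number) := by unfold Pre_returnDoubles; infer_instance
def pvWitness_returnDoubles : Int := 122

def Spec_returnDoubles (number : Int) (out : List (Int × Bool)) : Prop := out = returnDoubles_alt number
instance (number : Int) (out : List (Int × Bool)) : Decidable (Spec_returnDoubles number out) := by unfold Spec_returnDoubles; infer_instance

-- ===== CLAIM (what is proved, stated in full; the proofs are below) =====
def Claim_equal_returnDoubles : Prop := ∀ (number : Int), Dom_returnDoubles number → Pre_returnDoubles number → Spec_returnDoubles number (returnDoubles number)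

-- ===== LEMMAS AND PROOFS =====

-- A's loop, restated structurally over the character list (proof-only helper)
def pairsA (d : PySem.Dict Int Bool) : List Char → PySem.Dict Int Bool
  | a :: b :: t => pairsA (if pyDigit a = pyDigit b then d.insert (pyDigit a) true else d) (b :: t)
  | _ => d

def digits10 : List Char := ['0', '1', '2', '3', '4', '5', '6', '7', '8', '9']

lemma idx_eq_pairs (l : List Char) : ∀ d : PySem.Dict Int Bool,
    (List.range (l.length - 1)).foldl
      (fun d k =>
        let f := ((l[k]?).map pyDigit).getD 0
        let s := ((l[k + 1]?).map pyDigit).getD 0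
        if f = s then d.insert f true else d) d
      = pairsA d l := by
  induction l with
  | nil => intro d; simp [pairsA]
  | cons x t ih =>
    intro d
    cases t with
    | nil => simp [pairsA]
    | cons y t' =>
      have hlen : (x :: y :: t').length - 1 = t'.length + 1 := by simp
      rw [hlen, List.range_succ_eq_map, List.foldl_cons, List.foldl_map]
      have hb : (fun (d : PySem.Dict Int Bool) (k : Nat) =>
          let f := (((x :: y :: t')[k.succ]?).map pyDigit).getD 0
          let s := (((x :: y :: t')[k.succ + 1]?).map pyDigit).getD 0
          if f = s then d.insert f true else d)
          = (fun (d : PySem.Dict Int Bool) (k : Nat) =>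
          let f := (((y :: t')[k]?).map pyDigit).getD 0
          let s := (((y :: t')[k + 1]?).map pyDigit).getD 0
          if f = s then d.insert f true else d) := by
        funext d k
        simp [Nat.succ_eq_add_one, List.getElem?_cons_succ]
      rw [hb]
      have hlen2 : (y :: t').length - 1 = t'.length := by simp
      have := ih (if ((((x :: y :: t')[0]?).map pyDigit).getD 0)
            = ((((x :: y :: t')[1]?).map pyDigit).getD 0)
          then d.insert ((((x :: y :: t')[0]?).map pyDigit).getD 0) true else d)
      rw [hlen2] at this
      simp only [List.getElem?_cons_zero, List.getElem?_cons_succ] at this ⊢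
      rw [this]
      simp [pairsA]

lemma portA_eq (number : Int) :
    returnDoubles number = (pairsA PySem.Dict.empty (PySem.Int.toChars number)).items := by
  have h := idx_eq_pairs (PySem.Int.toChars number) PySem.Dict.empty
  simp only [returnDoubles, PySem.List.pyRange_one, PySem.List.len_eq, List.foldl_map, sub_zero]
  rw [show (((PySem.Int.toChars number).length : Int) - 1).toNat
      = (PySem.Int.toChars number).length - 1 from by omega]
  rw [← h]
  congr 1
  apply List.foldl_ext
  intro d k _
  simp only [zero_add]
  rw [show ((k : Int) + 1) = ((k + 1 : Nat) : Int) from by push_cast; ring]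
  simp only [PySem.List.pyGet?_natCast]

lemma pairs_eq_go : ∀ (t : List Char) (c : Char) (n : Int) (d : PySem.Dict Int Bool),
    (∀ a ∈ c :: t, ∀ b ∈ c :: t, pyDigit a = pyDigit b → a = b) → 1 ≤ n →
    pairsA (if 2 ≤ n then d.insert (pyDigit c) true else d) (c :: t) = rdGo d c n t := by
  intro t
  induction t with
  | nil => intro c n d _ _; simp [pairsA, rdGo]
  | cons x t' ih =>
    intro c n d hinj hn
    by_cases hx : x = c
    · subst hx
      have hsub : ∀ a ∈ x :: t', a ∈ x :: x :: t' := by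
        intro a ha
        rcases List.mem_cons.mp ha with h | h
        · simp [h]
        · simp [h]
      have h3 := ih x (n + 1) d (fun a ha b hb => hinj a (hsub a ha) b (hsub b hb)) (by omega)
      rw [if_pos (by omega : (2 : Int) ≤ n + 1)] at h3
      have h2 : (if 2 ≤ n then d.insert (pyDigit x) true else d).insert (pyDigit x) true
          = d.insert (pyDigit x) true := by
        split
        · exact PySem.Dict.insert_insert_self ..
        · rfl
      rw [rdGo, if_pos rfl, ← h3, pairsA, if_pos rfl, h2]
    · have hsub : ∀ a ∈ x :: t', a ∈ c :: x :: t' := by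
        intro a ha
        rcases List.mem_cons.mp ha with h | h
        · simp [h]
        · simp [h]
      have hne : ¬ pyDigit c = pyDigit x := by
        intro he
        exact hx (hinj c (by simp) x (by simp) he).symm
      have h3 := ih x 1 (if 2 ≤ n then d.insert (pyDigit c) true else d)
          (fun a ha b hb => hinj a (hsub a ha) b (hsub b hb)) (le_refl 1)
      rw [if_neg (by omega : ¬ (2 : Int) ≤ 1)] at h3
      rw [rdGo, if_neg hx, ← h3, pairsA, if_neg hne]

lemma digitChar_mem (m : Nat) (h : m < 10) : m.digitChar ∈ digits10 := by
  interval_cases m <;> decide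

lemma toDigitsCore_mem : ∀ (f n : Nat) (ds : List Char), (∀ c ∈ ds, c ∈ digits10) →
    ∀ c ∈ Nat.toDigitsCore 10 f n ds, c ∈ digits10 := by
  intro f
  induction f with
  | zero => intro n ds h c hc; exact h c hc
  | succ f ih =>
    intro n ds h c hc
    simp only [Nat.toDigitsCore] at hc
    split at hc
    · rcases List.mem_cons.mp hc with hc | hc
      · exact hc ▸ digitChar_mem _ (Nat.mod_lt _ (by omega))
      · exact h c hc
    · refine ih _ _ ?_ c hc
      intro x hx
      rcases List.mem_cons.mp hx with hx | hx
      · exact hx ▸ digitChar_mem _ (Nat.mod_lt _ (by omega))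
      · exact h x hx

lemma pyDigit_map : digits10.map pyDigit = [0, 1, 2, 3, 4, 5, 6, 7, 8, 9] := by rfl

lemma inj10 : ∀ a ∈ digits10, ∀ b ∈ digits10, pyDigit a = pyDigit b → a = b := by
  apply List.inj_on_of_nodup_map
  rw [pyDigit_map]; decide

-- ===== VERDICT (by name: the statement is the Claim_ definition above) =====
theorem returnDoubles_spec : Claim_equal_returnDoubles := by
  intro number _ hpre
  unfold Spec_returnDoubles returnDoubles_alt
  rw [portA_eq]
  have hnn : ¬ number < 0 := hpre.not_gt
  have hdig : ∀ c ∈ PySem.Int.toChars number, c ∈ digits10 := by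
    intro c hc
    simp only [PySem.Int.toChars, if_neg hnn, Nat.toDigits] at hc
    exact toDigitsCore_mem _ _ [] (by simp) c hc
  cases hl : PySem.Int.toChars number with
  | nil => rfl
  | cons c rest =>
    have hinj : ∀ a ∈ c :: rest, ∀ b ∈ c :: rest, pyDigit a = pyDigit b → a = b := by
      intro a ha b hb
      exact inj10 a (hdig a (hl ▸ ha)) b (hdig b (hl ▸ hb))
    have h := pairs_eq_go rest c 1 PySem.Dict.empty hinj (le_refl 1)
    rw [if_neg (by omega : ¬ (2 : Int) ≤ 1)] at h
    rw [h]
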